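-- pv_equiv track=rewrite | github.com/SilviuCristian45/Cracking-The-Coding-Interview | chapter5/5.3/main.py | GetNextMin
-- ===== SOURCE A (Python) =====
-- def GetBit(num , pos):
--     val = (1 << pos) & num
--     if val != 0:
--         return 1
--     return 0
--
-- def SetBit(num , pos):
--     return (1 << pos) ^ num
--
-- def GetNextMin(number):
--     index = 0
--     while index < 32:
--         bit_right = GetBit(number,index)
--         index+=1
--         bit_left = GetBit(number,index)
--         if bit_right == 0 and bit_left == 1:
--             index -= 1
--             number = SetBit(number , index)
--             index += 1
--             number = SetBit(number , index)
--             return number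
-- ===== SOURCE B (Python) =====
-- def GetNextMin(number):
--     # loop-free: mask marks every (bit i = 0, bit i+1 = 1) pair in the 32-bit
--     # scan window; isolate the lowest one with mask & -mask and flip the pair.
--     mask = ~number & (number >> 1) & 0xFFFFFFFF
--     if mask == 0:
--         return None
--     low = mask & -mask
--     return number ^ (3 * low)
-- ===== Notes on version B (the rewrite author's own statement) =====
-- stated objective: alternative
-- what changed: B removes A's 32-step GetBit/SetBit scanning loop entirely: a single bitwise expression ~n & (n >> 1) & 0xFFFFFFFF marks every adjacent (0,1) pair in the scan window, the classic mask & -mask trick isolates the lowest such pair without any loop, and one XOR with 3*low flips both bits; mask == 0 yields the implicit None.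
import Mathlib
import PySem

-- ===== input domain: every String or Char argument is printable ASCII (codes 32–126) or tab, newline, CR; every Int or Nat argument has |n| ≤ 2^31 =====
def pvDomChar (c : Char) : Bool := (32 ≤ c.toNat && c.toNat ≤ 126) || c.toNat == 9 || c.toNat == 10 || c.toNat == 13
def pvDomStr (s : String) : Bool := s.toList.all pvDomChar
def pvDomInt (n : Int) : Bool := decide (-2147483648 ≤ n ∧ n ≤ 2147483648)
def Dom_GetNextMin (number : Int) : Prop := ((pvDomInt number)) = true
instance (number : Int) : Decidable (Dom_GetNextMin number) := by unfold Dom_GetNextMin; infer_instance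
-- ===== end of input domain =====

-- B replaces A's 32-step GetBit/SetBit pattern scan by a loop-free bitwise
-- computation: mask = ~n & (n>>1) & 0xFFFFFFFF, lowest pair via mask & -mask,
-- one XOR flips both bits (objective: alternative, same constant cost).


-- ===== PORT A =====
-- Python's `&`, `^`, `~` on ints are ported with Mathlib's two's-complement
-- Int.land / Int.xor / Int.not (exact for every int); the bit position is a Nat
-- since A only ever shifts by the loop index 0..32.
def GetBit (num : Int) (pos : Nat) : Int :=
  if Int.land ((1 : Int) <<< pos) num ≠ 0 then 1 else 0

def SetBit (num : Int) (pos : Nat) : Int :=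
  Int.xor ((1 : Int) <<< pos) num

-- A's while-loop; the two `index += 1` / `index -= 1` steps are inlined as
-- `index` / `index + 1` exactly as the Python state evolves.
def GetNextMinLoop (number : Int) (index : Nat) : Option Int :=
  if _h : index < 32 then
    let bit_right := GetBit number index
    let bit_left := GetBit number (index + 1)
    if bit_right = 0 ∧ bit_left = 1 then
      some (SetBit (SetBit number index) (index + 1))
    else
      GetNextMinLoop number (index + 1)
  else none
termination_by 32 - index

def GetNextMin (number : Int) : Option Int := GetNextMinLoop number 0

-- ===== PORT B =====
-- mask = ~number & (number >> 1) & 0xFFFFFFFF  (nonnegative; bits mark the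
-- adjacent 0/1 pairs inside the 32-bit window)
def pyMask (number : Int) : Int :=
  Int.land (Int.land (Int.not number) (number >>> (1 : Nat))) 4294967295

-- Source B: if mask == 0: return None; low = mask & -mask; return number ^ (3*low)
def GetNextMin_alt (number : Int) : Option Int :=
  let mask := pyMask number
  if mask = 0 then none
  else
    let low := Int.land mask (-mask)
    some (Int.xor number (3 * low))

-- ===== PRECONDITION & SPEC =====
def Spec_GetNextMin (number : Int) (out : Option Int) : Prop := out = GetNextMin_alt number
instance (number : Int) (out : Option Int) : Decidable (Spec_GetNextMin number out) := by unfold Spec_GetNextMin; infer_instance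

-- ===== CLAIM (what is proved, stated in full; the proofs are below) =====
def Claim_equal_GetNextMin : Prop := ∀ (number : Int), Dom_GetNextMin number → Spec_GetNextMin number (GetNextMin number)

-- ===== LEMMAS AND PROOFS =====

-- extensionality for Int by bits
theorem int_eq_of_testBit_eq {x y : ℤ} (h : ∀ i, x.testBit i = y.testBit i) : x = y := by
  cases x with
  | ofNat m =>
    cases y with
    | ofNat n =>
      exact congrArg Int.ofNat (Nat.eq_of_testBit_eq fun i => h i)
    | negSucc n =>
      have hm : m < 2 ^ (m + n + 1) := Nat.lt_of_lt_of_le (Nat.lt_two_pow_self) (by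
        exact Nat.pow_le_pow_right (by omega) (by omega))
      have hn : n < 2 ^ (m + n + 1) := Nat.lt_of_lt_of_le (Nat.lt_two_pow_self) (by
        exact Nat.pow_le_pow_right (by omega) (by omega))
      have h1 := h (m + n + 1)
      simp [Int.testBit, Nat.testBit_eq_false_of_lt hm, Nat.testBit_eq_false_of_lt hn] at h1
  | negSucc m =>
    cases y with
    | ofNat n =>
      have hm : m < 2 ^ (m + n + 1) := Nat.lt_of_lt_of_le (Nat.lt_two_pow_self) (by
        exact Nat.pow_le_pow_right (by omega) (by omega))
      have hn : n < 2 ^ (m + n + 1) := Nat.lt_of_lt_of_le (Nat.lt_two_pow_self) (by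
        exact Nat.pow_le_pow_right (by omega) (by omega))
      have h1 := h (m + n + 1)
      simp [Int.testBit, Nat.testBit_eq_false_of_lt hm, Nat.testBit_eq_false_of_lt hn] at h1
    | negSucc n =>
      have : m = n := Nat.eq_of_testBit_eq fun i => by
        have h1 := h i
        simpa [Int.testBit] using h1
      simp [this]

theorem one_shl (i : ℕ) : (1 : ℤ) <<< i = ((2 ^ i : ℕ) : ℤ) := by
  rw [← Int.shiftLeft_natCast_right, Int.shiftLeft_eq_mul_pow]; push_cast; ring

theorem three_shl (i : ℕ) : (3 : ℤ) <<< i = ((3 * 2 ^ i : ℕ) : ℤ) := by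
  rw [← Int.shiftLeft_natCast_right, Int.shiftLeft_eq_mul_pow]; push_cast; ring

theorem testBit_natCast (m k : ℕ) : Int.testBit ((m : ℕ) : ℤ) k = m.testBit k := rfl

theorem testBit_shr (m : ℤ) (n k : ℕ) :
    Int.testBit (m >>> (n : ℕ)) k = m.testBit (n + k) := by
  cases m with
  | ofNat m =>
    rw [Int.ofNat_eq_natCast]
    have h : ((m : ℤ) >>> (n : ℕ)) = ((m >>> n : ℕ) : ℤ) := by
      rw [← Int.shiftRight_natCast_right, Int.shiftRight_natCast]
    rw [h, testBit_natCast, testBit_natCast, Nat.testBit_shiftRight]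
  | negSucc m =>
    have h : (Int.negSucc m) >>> (n : ℕ) = Int.negSucc (m >>> n) := by
      rw [← Int.shiftRight_natCast_right, Int.shiftRight_negSucc]
    rw [h]
    simp only [Int.testBit, Nat.testBit_shiftRight]

theorem int_testBit_zero (j : ℕ) : (0 : ℤ).testBit j = false := by
  rw [show (0 : ℤ) = ((0 : ℕ) : ℤ) from rfl, testBit_natCast, Nat.zero_testBit]

theorem land_two_pow (i : ℕ) (num : ℤ) :
    Int.land ((1 : ℤ) <<< i) num = if num.testBit i then (1 : ℤ) <<< i else 0 := by
  apply int_eq_of_testBit_eq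
  intro j
  rw [Int.testBit_land, one_shl, testBit_natCast, Nat.testBit_two_pow]
  by_cases hb : num.testBit i = true
  · rw [if_pos hb, testBit_natCast, Nat.testBit_two_pow]
    by_cases hij : i = j
    · subst hij; simp [hb]
    · simp [hij]
  · rw [if_neg hb, int_testBit_zero]
    by_cases hij : i = j
    · subst hij; simp_all
    · simp [hij]

theorem land_ne_zero_iff (i : ℕ) (num : ℤ) :
    (Int.land ((1 : ℤ) <<< i) num ≠ 0) ↔ num.testBit i = true := by
  rw [land_two_pow]
  by_cases hb : num.testBit i = true
  · rw [if_pos hb, one_shl]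
    have hp : ((2 ^ i : ℕ) : ℤ) ≠ 0 := by positivity
    simp only [hb, iff_true, ne_eq]
    exact hp
  · simp [hb]

theorem GetBit_eq (num : Int) (i : ℕ) :
    GetBit num i = if num.testBit i then 1 else 0 := by
  unfold GetBit
  by_cases hb : num.testBit i = true
  · rw [if_pos ((land_ne_zero_iff i num).mpr hb), if_pos hb]
  · rw [if_neg, if_neg hb]
    intro hc
    exact hb ((land_ne_zero_iff i num).mp hc)

theorem ffffffff_eq : (4294967295 : ℤ) = ((2 ^ 32 - 1 : ℕ) : ℤ) := by norm_num

theorem mask_testBit (number : ℤ) (j : ℕ) :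
    (pyMask number).testBit j =
      (!number.testBit j && number.testBit (j + 1) && decide (j < 32)) := by
  unfold pyMask
  rw [Int.testBit_land, Int.testBit_land, show Int.not number = Int.lnot number from rfl,
    Int.testBit_lnot, testBit_shr, ffffffff_eq, testBit_natCast,
    Nat.testBit_two_pow_sub_one, Nat.add_comm 1 j]

-- 3 << i flips exactly bits i and i+1
theorem nat_testBit_three_mul (i j : ℕ) :
    (3 * 2 ^ i).testBit j = (decide (j = i) ^^ decide (j = i + 1)) := by
  have h3 : (3 * 2 ^ i) = 3 <<< i := by rw [Nat.shiftLeft_eq]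
  have h32 : (3 : ℕ) = 2 ^ 2 - 1 := by norm_num
  rw [h3, Nat.testBit_shiftLeft, h32, Nat.testBit_two_pow_sub_one]
  by_cases h1 : j = i
  · subst h1
    simp
  · by_cases h2 : j = i + 1
    · subst h2
      have hge : i + 1 ≥ i := by omega
      have hlt : i + 1 - i < 2 := by omega
      simp [hge]
    · by_cases hge : j ≥ i
      · have hlt : ¬ (j - i < 2) := by omega
        simp [h1, h2, hge, hlt]
      · simp [h1, h2, hge]

theorem flip_eq (number : ℤ) (i : ℕ) :
    Int.xor number ((3 : ℤ) <<< i) = SetBit (SetBit number i) (i + 1) := by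
  unfold SetBit
  apply int_eq_of_testBit_eq
  intro j
  rw [Int.testBit_lxor, Int.testBit_lxor, Int.testBit_lxor, three_shl,
    one_shl, one_shl, testBit_natCast, testBit_natCast, testBit_natCast,
    nat_testBit_three_mul, Nat.testBit_two_pow, Nat.testBit_two_pow]
  have e1 : decide (i = j) = decide (j = i) := by simp [eq_comm]
  have e2 : decide (i + 1 = j) = decide (j = i + 1) := by simp [eq_comm]
  rw [e1, e2]
  simp [Bool.xor_comm, Bool.xor_left_comm]

-- ---- the mask is nonnegative ----
theorem land_natCast_nonneg (a : ℤ) (n : ℕ) : 0 ≤ Int.land a (Int.ofNat n) := by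
  cases a with
  | ofNat m => exact Int.natCast_nonneg _
  | negSucc m => exact Int.natCast_nonneg _

theorem pyMask_nonneg (number : ℤ) : 0 ≤ pyMask number :=
  land_natCast_nonneg _ 4294967295

-- ---- k & -k isolates the lowest set bit (Nat ldiff form) ----
theorem ldiff_pred (i : ℕ) : ∀ q : ℕ, q % 2 = 1 →
    Nat.ldiff (2 ^ i * q) (2 ^ i * q - 1) = 2 ^ i := by
  induction i with
  | zero =>
    intro q hq
    simp only [pow_zero, one_mul]
    apply Nat.eq_of_testBit_eq
    intro j
    rw [Nat.testBit_ldiff]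
    cases j with
    | zero =>
      rw [Nat.testBit_zero, Nat.testBit_zero, Nat.testBit_zero]
      have h1 : (q - 1) % 2 = 0 := by omega
      simp [hq, h1]
    | succ t =>
      rw [Nat.testBit_succ, Nat.testBit_succ, Nat.testBit_succ]
      have hhalf : (q - 1) / 2 = q / 2 := by omega
      have h1 : (1 : ℕ) / 2 = 0 := by norm_num
      rw [hhalf, h1, Nat.zero_testBit]
      cases (q / 2).testBit t <;> simp
  | succ i ih =>
    intro q hq
    have hm : (0 : ℕ) < 2 ^ i * q := by
      have : q ≠ 0 := by omega
      positivity
    apply Nat.eq_of_testBit_eq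
    intro j
    rw [Nat.testBit_ldiff]
    have hk : 2 ^ (i + 1) * q = 2 * (2 ^ i * q) := by ring
    cases j with
    | zero =>
      rw [Nat.testBit_zero, Nat.testBit_zero]
      have h1 : (2 ^ (i + 1) * q) % 2 = 0 := by omega
      have h2 : (2 ^ (i + 1)) % 2 = 0 := by
        have : 2 ^ (i + 1) = 2 * 2 ^ i := by ring
        omega
      simp [h1, h2]
    | succ t =>
      rw [Nat.testBit_succ, Nat.testBit_succ, Nat.testBit_succ]
      have h1 : (2 ^ (i + 1) * q) / 2 = 2 ^ i * q := by omega
      have h2 : (2 ^ (i + 1) * q - 1) / 2 = 2 ^ i * q - 1 := by omega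
      have h3 : (2 ^ (i + 1)) / 2 = 2 ^ i := by
        have : 2 ^ (i + 1) = 2 * 2 ^ i := by ring
        omega
      rw [h1, h2, h3, ← Nat.testBit_ldiff, ih q hq]

theorem land_neg_self (k : ℕ) (hk : k ≠ 0) :
    Int.land (Int.ofNat k) (-(Int.ofNat k)) = Int.ofNat (Nat.ldiff k (k - 1)) := by
  have h : -(Int.ofNat k) = Int.negSucc (k - 1) := by
    simp only [Int.ofNat_eq_natCast]
    omega
  rw [h]
  rfl

-- ---- A's loop, characterised through the mask's bits ----
theorem cond_iff (n : ℤ) (j : ℕ) (hj : j < 32) :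
    (GetBit n j = 0 ∧ GetBit n (j + 1) = 1) ↔ (pyMask n).testBit j = true := by
  rw [mask_testBit, GetBit_eq, GetBit_eq]
  by_cases h0 : n.testBit j <;> by_cases h1 : n.testBit (j + 1) <;>
    simp [h0, h1, hj]

theorem loop_none (n : ℤ) (hall : ∀ j, (pyMask n).testBit j = false) :
    ∀ fuel j, 32 - j ≤ fuel → GetNextMinLoop n j = none := by
  intro fuel
  induction fuel with
  | zero =>
    intro j hj
    rw [GetNextMinLoop, dif_neg (by omega : ¬ j < 32)]
  | succ fuel ih =>
    intro j hj
    rw [GetNextMinLoop]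
    by_cases h32 : j < 32
    · rw [dif_pos h32, if_neg, ]
      · exact ih (j + 1) (by omega)
      · intro hc
        have := (cond_iff n j h32).mp hc
        rw [hall j] at this
        exact Bool.false_ne_true this
    · rw [dif_neg h32]

theorem loop_some (n : ℤ) (i : ℕ) (hi32 : i < 32)
    (hbit : (pyMask n).testBit i = true)
    (hmin : ∀ j, j < i → (pyMask n).testBit j = false) :
    ∀ fuel j, 32 - j ≤ fuel → j ≤ i →
      GetNextMinLoop n j = some (SetBit (SetBit n i) (i + 1)) := by
  intro fuel
  induction fuel with
  | zero =>
    intro j hj hji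
    omega
  | succ fuel ih =>
    intro j hj hji
    have hj32 : j < 32 := by omega
    rw [GetNextMinLoop, dif_pos hj32]
    by_cases hcase : j = i
    · subst hcase
      rw [if_pos ((cond_iff n j hj32).mpr hbit)]
    · rw [if_neg]
      · exact ih (j + 1) (by omega) (by omega)
      · intro hc
        have := (cond_iff n j hj32).mp hc
        rw [hmin j (by omega)] at this
        exact Bool.false_ne_true this

-- ===== VERDICT (by name: the statement is the Claim_ definition above) =====
theorem GetNextMin_spec : Claim_equal_GetNextMin := by
  intro number _
  unfold Spec_GetNextMin GetNextMin GetNextMin_alt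
  simp only []
  by_cases hm : pyMask number = 0
  · rw [if_pos hm]
    apply loop_none number _ 32 0 (by omega)
    intro j
    rw [hm, int_testBit_zero]
  · rw [if_neg hm]
    -- write the mask as a Nat
    set m := pyMask number with hmdef
    have hnn : 0 ≤ m := pyMask_nonneg number
    obtain ⟨k, hk⟩ : ∃ k : ℕ, m = Int.ofNat k :=
      ⟨m.toNat, by rw [Int.ofNat_eq_natCast, Int.toNat_of_nonneg hnn]⟩
    have hk0 : k ≠ 0 := by
      intro h; apply hm; rw [hk, h]; rfl
    -- factor out the lowest set bit
    obtain ⟨i, q, hq2, hkiq⟩ := Nat.exists_eq_pow_mul_and_not_dvd hk0 2 (by norm_num)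
    have hqodd : q % 2 = 1 := by omega
    -- the mask's bit i is set, all lower bits are clear
    have hbit : m.testBit i = true := by
      rw [hk]
      show k.testBit i = true
      rw [hkiq, mul_comm, ← Nat.shiftLeft_eq, Nat.testBit_shiftLeft]
      simp [Nat.testBit_zero, hqodd]
    have hmin : ∀ j, j < i → m.testBit j = false := by
      intro j hji
      rw [hk]
      show k.testBit j = false
      rw [hkiq, mul_comm, ← Nat.shiftLeft_eq, Nat.testBit_shiftLeft]
      have hle : ¬ i ≤ j := by omega
      simp [hle]
    have hi32 : i < 32 := by
      have := mask_testBit number i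
      rw [hbit] at this
      by_contra hge
      simp [hge] at this
    -- the isolated low bit is 2^i
    have hlow : Int.land m (-m) = ((2 ^ i : ℕ) : ℤ) := by
      rw [hk, land_neg_self k hk0]
      have : Nat.ldiff k (k - 1) = 2 ^ i := by
        rw [hkiq]; exact ldiff_pred i q hqodd
      rw [this]; rfl
    -- both sides compute the same flipped number
    rw [loop_some number i hi32 hbit hmin 32 0 (by omega) (by omega)]
    rw [hlow]
    have h3 : (3 : ℤ) * ((2 ^ i : ℕ) : ℤ) = (3 : ℤ) <<< i := by
      rw [three_shl]; push_cast; ring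
    rw [h3, flip_eq]
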